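-- pv_equiv track=rewrite | github.com/GospelSugarvi/vtrack-vivo | fix_t_injections.py | get_block_start
-- ===== SOURCE A (Python) =====
-- def get_block_start(content, error_line):
--     # Search backwards for "{"
--     lines = content.split('\n')
--     idx = error_line - 1
--
--     # We want to find the nearest Widget build(..., or any method returning Widget that uses `context`
--     while idx >= 0:
--         if 'Widget ' in lines[idx] and '{' in lines[idx] and 'context' in lines[idx]:
--             return idx
--         if 'build(BuildContext' in lines[idx]:
--             return idx
--         idx -= 1
--     return -1
-- ===== SOURCE B (Python) =====
-- def get_block_start(content, error_line):
--     # Forward scan over the first error_line lines, remembering the LAST matching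
--     # index (== the nearest match below error_line, found without early return).
--     last = -1
--     for idx, line in enumerate(content.split('\n')[:max(error_line, 0)]):
--         if ('Widget ' in line and '{' in line and 'context' in line) or 'build(BuildContext' in line:
--             last = idx
--     return last
-- ===== Notes on version B (the rewrite author's own statement) =====
-- stated objective: alternative
-- what changed: Replaces A's backward while-loop with early returns by a single forward enumerate over the sliced prefix that keeps a last-match accumulator; the slice also makes B total where A indexes out of range.
import Mathlib
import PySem

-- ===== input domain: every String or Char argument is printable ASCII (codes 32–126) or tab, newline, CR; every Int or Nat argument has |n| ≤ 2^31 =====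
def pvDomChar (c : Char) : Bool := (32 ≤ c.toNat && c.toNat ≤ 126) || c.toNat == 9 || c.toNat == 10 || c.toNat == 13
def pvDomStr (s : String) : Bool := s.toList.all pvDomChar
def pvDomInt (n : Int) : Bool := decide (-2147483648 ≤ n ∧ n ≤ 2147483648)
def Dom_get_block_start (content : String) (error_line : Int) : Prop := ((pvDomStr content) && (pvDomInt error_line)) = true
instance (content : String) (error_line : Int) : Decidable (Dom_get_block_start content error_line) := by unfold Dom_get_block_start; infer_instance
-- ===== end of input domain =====

-- B replaces A's backward early-return scan by a forward fold with a last-match accumulator (alternative decomposition).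

-- ===== PORT A =====
-- the two 'in' tests of A, in A's order
def pvC1 (line : String) : Bool :=
  PySem.Str.isIn "Widget " line && PySem.Str.isIn "{" line && PySem.Str.isIn "context" line
def pvC2 (line : String) : Bool := PySem.Str.isIn "build(BuildContext" line

-- A's 'while idx >= 0' loop, idx counted down; lines[idx] via pyGet? (inside Pre_ it is always in range; '.getD ""' only totalizes)
def pvALoop (lines : List String) : Nat → Int
  | 0 =>
    let line := (PySem.List.pyGet? lines (0 : Int)).getD ""
    if pvC1 line then 0 else if pvC2 line then 0 else -1
  | n+1 =>
    let line := (PySem.List.pyGet? lines ((n : Int) + 1)).getD ""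
    if pvC1 line then (n : Int) + 1 else if pvC2 line then (n : Int) + 1 else pvALoop lines n

def get_block_start (content : String) (error_line : Int) : Int :=
  let lines := (PySem.Str.split? content "\n").getD []
  if error_line - 1 < 0 then -1 else pvALoop lines (error_line - 1).toNat

-- ===== PORT B =====
def get_block_start_alt (content : String) (error_line : Int) : Int :=
  let lines := (PySem.Str.split? content "\n").getD []
  let pref := PySem.List.slice lines none (some (max error_line 0))
  (PySem.List.enumerate pref).foldl
    (fun last p => if pvC1 p.2 || pvC2 p.2 then p.1 else last) (-1)

-- ===== PRECONDITION & SPEC =====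
-- Pre_ excludes exactly the inputs where A raises IndexError: error_line larger than the number of lines.
def Pre_get_block_start (content : String) (error_line : Int) : Prop :=
  error_line ≤ (((PySem.Str.split? content "\n").getD []).length : Int)
instance (content : String) (error_line : Int) : Decidable (Pre_get_block_start content error_line) := by
  unfold Pre_get_block_start; infer_instance
def pvWitness_get_block_start : String × Int := ("x\nbuild(BuildContext ctx) {\ny", 3)

def Spec_get_block_start (content : String) (error_line : Int) (out : Int) : Prop := out = get_block_start_alt content error_line
instance (content : String) (error_line : Int) (out : Int) : Decidable (Spec_get_block_start content error_line out) := by unfold Spec_get_block_start; infer_instance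

-- ===== CLAIM (what is proved, stated in full; the proofs are below) =====
def Claim_equal_get_block_start : Prop := ∀ (content : String) (error_line : Int), Dom_get_block_start content error_line → Pre_get_block_start content error_line → Spec_get_block_start content error_line (get_block_start content error_line)

-- ===== LEMMAS AND PROOFS =====

-- B's fold step
def pvStep (last : Int) (p : Int × String) : Int := if pvC1 p.2 || pvC2 p.2 then p.1 else last

lemma pvALoop_eq_fold (lines : List String) (n : Nat) (h : n < lines.length) :
    pvALoop lines n
      = (PySem.List.enumerate (lines.take (n+1))).foldl pvStep (-1) := by
  induction n with
  | zero =>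
    obtain ⟨l0, rest, rfl⟩ : ∃ l0 rest, lines = l0 :: rest := by
      cases lines with
      | nil => simp at h
      | cons a b => exact ⟨a, b, rfl⟩
    simp [pvALoop, PySem.List.enumerate_cons, pvStep]
    by_cases h1 : pvC1 l0 <;> by_cases h2 : pvC2 l0 <;> simp [h1, h2]
  | succ n ih =>
    have hn : n < lines.length := by omega
    have hget : (PySem.List.pyGet? lines ((n : Int) + 1)).getD "" = lines[n+1] := by
      have : ((n : Int) + 1) = ((n + 1 : Nat) : Int) := by push_cast; ring
      rw [this, PySem.List.pyGet?_natCast]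
      simp [List.getElem?_eq_getElem h]
    have htake : lines.take (n+2) = lines.take (n+1) ++ [lines[n+1]] := by
      simp [List.take_add_one, List.getElem?_eq_getElem h]
    rw [htake, PySem.List.enumerate_append, List.foldl_append]
    have hlen : (lines.take (n+1)).length = n + 1 := by
      simp; omega
    simp only [PySem.List.enumerate_cons, PySem.List.enumerate_nil, hlen, List.foldl_cons,
      List.foldl_nil]
    rw [← ih hn]
    show pvALoop lines (n+1) = pvStep (pvALoop lines n) (0 + (↑n + 1), lines[n+1])
    simp only [pvALoop, hget, pvStep]
    by_cases h1 : pvC1 lines[n+1] <;> by_cases h2 : pvC2 lines[n+1] <;>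
      simp [h1, h2]

-- ===== VERDICT (by name: the statement is the Claim_ definition above) =====
theorem get_block_start_spec : Claim_equal_get_block_start := by
  intro content error_line _ hpre
  unfold Spec_get_block_start get_block_start get_block_start_alt
  unfold Pre_get_block_start at hpre
  set lines := (PySem.Str.split? content "\n").getD [] with hlines
  by_cases hneg : error_line - 1 < 0
  · have hm : max error_line 0 = 0 := by omega
    simp [hneg, hm, PySem.List.slice_to, PySem.List.enumerate_nil]
  · have h0 : 0 ≤ error_line := by omega
    have hmax : max error_line 0 = error_line := by omega
    have hidx : (error_line - 1).toNat < lines.length := by omega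
    have hEL : error_line.toNat = (error_line - 1).toNat + 1 := by omega
    simp only [hneg, if_false, hmax]
    rw [PySem.List.slice_to _ h0, pvALoop_eq_fold lines _ hidx, hEL]
    rfl
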